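-- pv_equiv track=rewrite | github.com/supersambo/papis-tui | papistui/features/sorting.py | sort_group
-- ===== SOURCE A (Python) =====
-- def sort_group(docs, key):
--     """ Return list of lists containing documents with equal values in key
--
--     :param docs: list of documents
--     :param key: key according to which documents are grouped
--     """
--     groups = []
--     g = []
--     for idx, doc in enumerate(docs):
--         g.append(doc)
--         if idx + 1 < len(docs):
--             if docs[idx][key] != docs[idx + 1][key]:
--                 groups.append(g)
--                 g = []
--         else:
--             groups.append(g)
--     return groups
-- ===== SOURCE B (Python) =====
-- def sort_group(docs, key):
--     """ Return list of lists containing documents with equal values in key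
--
--     :param docs: list of documents
--     :param key: key according to which documents are grouped
--     """
--     groups = []
--     for doc in reversed(docs):
--         if groups and doc[key] == groups[0][0][key]:
--             groups[0].insert(0, doc)
--         else:
--             groups.insert(0, [doc])
--     return groups
-- ===== Notes on version B (the rewrite author's own statement) =====
-- stated objective: simpler
-- what changed: B traverses the documents in reverse and builds the grouped result directly by either prepending the document to the current first group or opening a new group in front, instead of A's forward loop with a pending-group accumulator, flush-on-boundary logic and index-based lookahead comparisons.
import Mathlib
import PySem

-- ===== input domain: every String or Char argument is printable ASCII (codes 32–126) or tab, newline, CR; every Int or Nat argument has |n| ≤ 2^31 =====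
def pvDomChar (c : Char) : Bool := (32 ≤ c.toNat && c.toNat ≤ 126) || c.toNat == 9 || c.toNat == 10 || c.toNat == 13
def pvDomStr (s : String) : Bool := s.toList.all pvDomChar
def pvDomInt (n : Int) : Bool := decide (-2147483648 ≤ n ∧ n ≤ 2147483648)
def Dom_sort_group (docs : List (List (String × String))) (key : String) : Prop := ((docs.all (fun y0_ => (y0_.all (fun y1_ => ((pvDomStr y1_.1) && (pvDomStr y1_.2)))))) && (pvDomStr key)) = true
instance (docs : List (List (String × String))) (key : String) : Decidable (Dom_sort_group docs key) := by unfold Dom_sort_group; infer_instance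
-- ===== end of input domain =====

-- B groups consecutive equal-key documents by a reverse traversal that builds the
-- result directly (prepend to first group or open a new one), replacing A's forward
-- accumulator-and-flush loop with index lookahead; objective: simpler.

-- doc[key]: first-match lookup in the association list (Python dict access; none = KeyError)
def pvKey (key : String) (doc : List (String × String)) : Option String :=
  (PySem.Dict.mk doc).get? key

-- ===== PORT A =====
def sort_group (docs : List (List (String × String))) (key : String) : List (List (List (String × String))) :=
  let st := (PySem.List.enumerate docs).foldl
    (fun (st : List (List (List (String × String))) × List (List (String × String)))
         (p : Int × List (String × String)) =>
      let g := st.2 ++ [p.2]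
      if p.1 + 1 < (docs.length : Int) then
        if pvKey key (PySem.List.pyGetD docs p.1 []) ≠ pvKey key (PySem.List.pyGetD docs (p.1 + 1) []) then
          (st.1 ++ [g], ([] : List (List (String × String))))
        else (st.1, g)
      else (st.1 ++ [g], g))
    (([] : List (List (List (String × String)))), ([] : List (List (String × String))))
  st.1

-- ===== PORT B =====
def sort_group_alt (docs : List (List (String × String))) (key : String) : List (List (List (String × String))) :=
  docs.reverse.foldl
    (fun (groups : List (List (List (String × String)))) doc =>
      if groups ≠ [] ∧ pvKey key doc = pvKey key (PySem.List.pyGetD (PySem.List.pyGetD groups 0 []) 0 []) then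
        (doc :: PySem.List.pyGetD groups 0 []) :: groups.tail
      else
        [doc] :: groups)
    []

-- ===== PRECONDITION & SPEC =====
-- Pre_ excludes exactly the inputs where Python A raises KeyError: when there are at
-- least two documents, every document's key is accessed, so each must contain `key`.
def Pre_sort_group (docs : List (List (String × String))) (key : String) : Prop :=
  2 ≤ docs.length → ∀ doc ∈ docs, (pvKey key doc).isSome = true
instance (docs : List (List (String × String))) (key : String) : Decidable (Pre_sort_group docs key) := by
  unfold Pre_sort_group; infer_instance

def pvWitness_sort_group : (List (List (String × String))) × String :=
  ([[("k", "a")], [("k", "a"), ("x", "1")], [("k", "b")]], "k")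

def Spec_sort_group (docs : List (List (String × String))) (key : String) (out : List (List (List (String × String)))) : Prop := out = sort_group_alt docs key
instance (docs : List (List (String × String))) (key : String) (out : List (List (List (String × String)))) : Decidable (Spec_sort_group docs key out) := by unfold Spec_sort_group; infer_instance

-- ===== CLAIM (what is proved, stated in full; the proofs are below) =====
def Claim_equal_sort_group : Prop := ∀ (docs : List (List (String × String))) (key : String), Dom_sort_group docs key → Pre_sort_group docs key → Spec_sort_group docs key (sort_group docs key)

-- ===== LEMMAS AND PROOFS =====

-- B's loop as a foldr (fold over the reversed list, building the result front-first)
def pvF (key : String) (docs : List (List (String × String))) : List (List (List (String × String))) :=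
  docs.foldr
    (fun doc groups =>
      if groups ≠ [] ∧ pvKey key doc = pvKey key (PySem.List.pyGetD (PySem.List.pyGetD groups 0 []) 0 []) then
        (doc :: PySem.List.pyGetD groups 0 []) :: groups.tail
      else
        [doc] :: groups)
    []

lemma sort_group_alt_eq_pvF (docs : List (List (String × String))) (key : String) :
    sort_group_alt docs key = pvF key docs := by
  simp [sort_group_alt, pvF, List.foldl_reverse]

-- A's loop, structurally: pending group g, remaining suffix; returns (finished groups, final g)
def pvGo (key : String) :
    List (List (String × String)) → List (List (String × String)) →
    (List (List (List (String × String))) × List (List (String × String)))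
  | g, [] => ([], g)
  | g, [d] => ([g ++ [d]], g ++ [d])
  | g, d :: d2 :: rest =>
    if pvKey key d ≠ pvKey key d2 then
      ((g ++ [d]) :: (pvGo key [] (d2 :: rest)).1, (pvGo key [] (d2 :: rest)).2)
    else
      pvGo key (g ++ [d]) (d2 :: rest)

lemma getD_append_cons_length {α : Type} (pre : List α) (d : α) (rest : List α) (dflt : α) :
    (pre ++ d :: rest).getD pre.length dflt = d := by
  simp

lemma sort_group_foldl (key : String) (docs : List (List (String × String))) :
    ∀ (suf pre : List (List (String × String)))
      (groups : List (List (List (String × String)))) (g : List (List (String × String))),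
      docs = pre ++ suf →
      (PySem.List.enumerate suf (pre.length : Int)).foldl
        (fun (st : List (List (List (String × String))) × List (List (String × String)))
             (p : Int × List (String × String)) =>
          let g := st.2 ++ [p.2]
          if p.1 + 1 < (docs.length : Int) then
            if pvKey key (PySem.List.pyGetD docs p.1 []) ≠ pvKey key (PySem.List.pyGetD docs (p.1 + 1) []) then
              (st.1 ++ [g], ([] : List (List (String × String))))
            else (st.1, g)
          else (st.1 ++ [g], g))
        (groups, g)
      = (groups ++ (pvGo key g suf).1, (pvGo key g suf).2) := by
  intro suf
  induction suf with
  | nil => intro pre groups g _; simp [PySem.List.enumerate, pvGo]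
  | cons d rest ih =>
    intro pre groups g hd
    rw [PySem.List.enumerate_cons, List.foldl_cons]
    have hget1 : PySem.List.pyGetD docs ((pre.length : Int)) [] = d := by
      rw [PySem.List.pyGetD_natCast]; subst hd; exact getD_append_cons_length pre d rest []
    cases rest with
    | nil =>
      have hn : docs.length = pre.length + 1 := by subst hd; simp
      have hcond : ¬ ((pre.length : Int) + 1 < (docs.length : Int)) := by omega
      simp only [hcond, if_false, PySem.List.enumerate, List.foldl_nil, pvGo]
    | cons d2 rest' =>
      have hn : docs.length = pre.length + 2 + rest'.length := by
        subst hd; simp; omega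
      have hcond : (pre.length : Int) + 1 < (docs.length : Int) := by omega
      have hget2 : PySem.List.pyGetD docs ((pre.length : Int) + 1) [] = d2 := by
        have : ((pre.length : Int) + 1) = (((pre ++ [d]).length : Nat) : Int) := by simp
        rw [this, PySem.List.pyGetD_natCast]
        have hd2 : docs = (pre ++ [d]) ++ d2 :: rest' := by simp [hd]
        rw [hd2]; exact getD_append_cons_length (pre ++ [d]) d2 rest' []
      simp only [hcond, if_true, hget1, hget2]
      by_cases hne : pvKey key d ≠ pvKey key d2
      · rw [if_pos hne]
        have := ih (pre ++ [d]) (groups ++ [g ++ [d]]) [] (by simp [hd])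
        have hcast : (((pre ++ [d]).length : Nat) : Int) = (pre.length : Int) + 1 := by
          simp
        rw [hcast] at this
        rw [this]
        simp only [pvGo]
        rw [if_pos hne]
        simp
      · rw [if_neg hne]
        have := ih (pre ++ [d]) groups (g ++ [d]) (by simp [hd])
        have hcast : (((pre ++ [d]).length : Nat) : Int) = (pre.length : Int) + 1 := by
          simp
        rw [hcast] at this
        rw [this]
        simp only [pvGo]
        rw [if_neg hne]

lemma pvGo_eq_pvF (key : String) :
    ∀ (rest : List (List (String × String))) (d : List (String × String)),
      ∃ t gs, pvF key (d :: rest) = (d :: t) :: gs ∧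
        ∀ g, (pvGo key g (d :: rest)).1 = (g ++ d :: t) :: gs := by
  intro rest
  induction rest with
  | nil =>
    intro d
    refine ⟨[], [], ?_, ?_⟩
    · simp [pvF]
    · intro g; simp [pvGo]
  | cons d2 rest' ih =>
    intro d
    obtain ⟨t, gs, hF, hGo⟩ := ih d2
    by_cases heq : pvKey key d = pvKey key d2
    · refine ⟨d2 :: t, gs, ?_, ?_⟩
      · show (d :: d2 :: rest').foldr _ [] = _
        rw [List.foldr_cons]
        have : (d2 :: rest').foldr
            (fun doc groups =>
              if groups ≠ [] ∧ pvKey key doc = pvKey key (PySem.List.pyGetD (PySem.List.pyGetD groups 0 []) 0 []) then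
                (doc :: PySem.List.pyGetD groups 0 []) :: groups.tail
              else [doc] :: groups) [] = (d2 :: t) :: gs := hF
        rw [this]
        simp [PySem.List.pyGetD_zero_cons, heq]
      · intro g
        simp only [pvGo]
        rw [if_neg (not_ne_iff.mpr heq), hGo (g ++ [d])]
        simp
    · refine ⟨[], (d2 :: t) :: gs, ?_, ?_⟩
      · show (d :: d2 :: rest').foldr _ [] = _
        rw [List.foldr_cons]
        have : (d2 :: rest').foldr
            (fun doc groups =>
              if groups ≠ [] ∧ pvKey key doc = pvKey key (PySem.List.pyGetD (PySem.List.pyGetD groups 0 []) 0 []) then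
                (doc :: PySem.List.pyGetD groups 0 []) :: groups.tail
              else [doc] :: groups) [] = (d2 :: t) :: gs := hF
        rw [this]
        simp [PySem.List.pyGetD_zero_cons, heq]
      · intro g
        simp only [pvGo]
        rw [if_pos heq]
        simp [hGo []]

-- ===== VERDICT (by name: the statement is the Claim_ definition above) =====
theorem sort_group_spec : Claim_equal_sort_group := by
  intro docs key _hdom _hpre
  unfold Spec_sort_group
  rw [sort_group_alt_eq_pvF]
  show sort_group docs key = pvF key docs
  have hA : sort_group docs key = (pvGo key [] docs).1 := by
    unfold sort_group
    have h0 : (0 : Int) = ((([] : List (List (String × String))).length : Nat) : Int) := by simp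
    have := sort_group_foldl key docs docs [] [] [] (by simp)
    simp only [List.length_nil, Nat.cast_zero] at this
    rw [this]
    simp
  rw [hA]
  cases docs with
  | nil => simp [pvGo, pvF]
  | cons d rest =>
    obtain ⟨t, gs, hF, hGo⟩ := pvGo_eq_pvF key rest d
    rw [hF, hGo []]
    simp
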